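-- pv_equiv track=rewrite | github.com/yuvalkalan/Tkinter-Reshaper | main.py | move_punctuations
-- ===== SOURCE A (Python) =====
-- import string
--
-- REVERSE = {'(': ')', ')': '('}
--
-- def move_punctuations(s: str):
--     """
--     this function swipe punctuations from start to end
--     for example: '!@#abc%$#' -> '#$%abc!@#'
--     """
--     if not s:
--         return s
--     start_spaces = ''
--     end_spaces = ''
--     for char in s:
--         if char in string.punctuation + ' ':
--             start_spaces += char
--         else:
--             break
--     for char in s[::-1]:
--         if char in string.punctuation + ' ':
--             end_spaces += char
--         else:
--             break
--     new_start = ''.join([REVERSE[c] if c in REVERSE else c for c in end_spaces])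
--     new_end = ''.join([REVERSE[c] if c in REVERSE else c for c in start_spaces])
--     return new_start + s.lstrip(start_spaces).rstrip(end_spaces) + new_end
-- ===== SOURCE B (Python) =====
-- import string
--
-- REVERSE = {'(': ')', ')': '('}
-- _PUNCT = frozenset(string.punctuation + ' ')
-- _SWAP = str.maketrans('()', ')(')
--
--
-- def move_punctuations(s: str):
--     """Swap the leading and trailing punctuation runs, mirroring brackets."""
--     n = len(s)
--     i = next((k for k, c in enumerate(s) if c not in _PUNCT), n)
--     j = next((k for k, c in enumerate(reversed(s)) if c not in _PUNCT), n)
--     return s[n - j:][::-1].translate(_SWAP) + s[i:n - j] + s[:i].translate(_SWAP)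
-- ===== Notes on version B (the rewrite author's own statement) =====
-- stated objective: idiomatic
-- what changed: B computes the two boundary indices (first non-punctuation from each end) and builds the result from three slices with a translate table, instead of A's char-by-char accumulation of the runs followed by lstrip/rstrip with dynamic strip-sets.
import Mathlib
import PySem

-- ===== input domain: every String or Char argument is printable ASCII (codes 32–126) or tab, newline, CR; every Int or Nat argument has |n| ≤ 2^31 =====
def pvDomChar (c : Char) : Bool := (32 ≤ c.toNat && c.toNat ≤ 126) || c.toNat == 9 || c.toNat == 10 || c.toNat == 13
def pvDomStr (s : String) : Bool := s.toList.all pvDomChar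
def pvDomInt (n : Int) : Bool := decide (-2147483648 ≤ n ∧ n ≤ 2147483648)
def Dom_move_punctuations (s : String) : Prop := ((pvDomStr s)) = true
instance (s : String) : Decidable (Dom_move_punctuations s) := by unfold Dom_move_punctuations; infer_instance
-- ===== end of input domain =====

-- B: compute the two boundary indices (first non-punctuation char from each end) and
-- assemble the result from three slices with a bracket-swapping translate map, instead of
-- A's char-by-char run accumulation followed by lstrip/rstrip with dynamic strip-sets.

-- string.punctuation + ' '  (shared constant of both sources)
def pvPunct : List Char := "!\"#$%&'()*+,-./:;<=>?@[\\]^_`{|}~ ".toList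

-- ===== PORT A =====

-- REVERSE[c] if c in REVERSE else c, with REVERSE = {'(': ')', ')': '('}
def pvRev (c : Char) : Char := if c = '(' then ')' else if c = ')' then '(' else c

-- the for-loop with break: accumulate chars while they are in string.punctuation + ' '
def pvRun : List Char → List Char
  | [] => []
  | c :: cs => if c ∈ pvPunct then c :: pvRun cs else []

-- str.lstrip(chars) / str.rstrip(chars): drop leading / trailing chars belonging to the set
-- (exact: Python strips by membership in the argument string)
def pvLstrip (xs : List Char) (set : List Char) : List Char := xs.dropWhile (· ∈ set)
def pvRstrip (xs : List Char) (set : List Char) : List Char := (xs.reverse.dropWhile (· ∈ set)).reverse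

def move_punctuations (s : String) : String :=
  if s.toList = [] then s                 -- if not s: return s
  else
    let cs := s.toList
    let start_spaces := pvRun cs          -- first for-loop
    let end_spaces := pvRun cs.reverse    -- second for-loop over s[::-1]
    let new_start := end_spaces.map pvRev -- ''.join([REVERSE[c] … for c in end_spaces])
    let new_end := start_spaces.map pvRev
    String.ofList (new_start ++ pvRstrip (pvLstrip cs start_spaces) end_spaces ++ new_end)

-- ===== PORT B =====

-- str.maketrans('()', ')(') applied by translate
def pvSwap (c : Char) : Char := if c = '(' then ')' else if c = ')' then '(' else c

-- next((k for k, c in enumerate(xs) if c not in _PUNCT), len(xs))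
def pvFirstNon : List Char → Nat
  | [] => 0
  | c :: cs => if c ∈ pvPunct then pvFirstNon cs + 1 else 0

def move_punctuations_alt (s : String) : String :=
  let cs := s.toList
  let n := cs.length
  let i := pvFirstNon cs
  let j := pvFirstNon cs.reverse
  -- s[n-j:][::-1].translate(_SWAP) + s[i:n-j] + s[:i].translate(_SWAP)
  -- (all slice bounds are the natural numbers 0 ≤ i, n-j ≤ n, so take/drop are exact)
  String.ofList ((cs.drop (n - j)).reverse.map pvSwap
                 ++ ((cs.take (n - j)).drop i)
                 ++ (cs.take i).map pvSwap)

-- ===== PRECONDITION & SPEC =====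
def Spec_move_punctuations (s : String) (out : String) : Prop := out = move_punctuations_alt s
instance (s : String) (out : String) : Decidable (Spec_move_punctuations s out) := by unfold Spec_move_punctuations; infer_instance

-- ===== CLAIM (what is proved, stated in full; the proofs are below) =====
def Claim_equal_move_punctuations : Prop := ∀ (s : String), Dom_move_punctuations s → Spec_move_punctuations s (move_punctuations s)

-- ===== LEMMAS AND PROOFS =====

def pvP (c : Char) : Bool := c ∈ pvPunct

theorem pvRun_eq_takeWhile (xs : List Char) : pvRun xs = xs.takeWhile pvP := by
  induction xs with
  | nil => rfl
  | cons c cs ih => by_cases h : c ∈ pvPunct <;> simp [pvRun, pvP, h, ih]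

theorem pvFirstNon_eq (xs : List Char) : pvFirstNon xs = (xs.takeWhile pvP).length := by
  induction xs with
  | nil => rfl
  | cons c cs ih => by_cases h : c ∈ pvPunct <;> simp [pvFirstNon, pvP, h, ih]

theorem pvSwap_eq_pvRev : pvSwap = pvRev := rfl

-- stripping by membership in a set l that contains the whole punctuation run and only
-- punctuation chars is the same as dropping the punctuation run
theorem dropWhile_mem_eq (xs l : List Char)
    (h1 : ∀ a ∈ xs.takeWhile pvP, a ∈ l) (h2 : ∀ a ∈ l, pvP a) :
    xs.dropWhile (· ∈ l) = xs.dropWhile pvP := by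
  induction xs with
  | nil => rfl
  | cons c cs ih =>
    by_cases hc : pvP c
    · have hcl : c ∈ l := h1 c (by simp [hc])
      have : cs.dropWhile (· ∈ l) = cs.dropWhile pvP :=
        ih (fun a ha => h1 a (by simp [hc, ha]))
      simp [hcl, hc, this]
    · have hcl : c ∉ l := fun h => hc (h2 c h)
      simp [hcl, hc]
  
theorem take_takeWhile_length (xs : List Char) :
    xs.take (xs.takeWhile pvP).length = xs.takeWhile pvP := by
  induction xs with
  | nil => rfl
  | cons c cs ih => by_cases h : pvP c <;> simp [h, ih]

theorem drop_takeWhile_length (xs : List Char) :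
    xs.drop (xs.takeWhile pvP).length = xs.dropWhile pvP := by
  induction xs with
  | nil => rfl
  | cons c cs ih => by_cases h : pvP c <;> simp [h, ih]

theorem mem_takeWhile_append (a : Char) (xs ys : List Char)
    (h : a ∈ xs.takeWhile pvP) : a ∈ (xs ++ ys).takeWhile pvP := by
  rw [List.takeWhile_append]
  split
  · exact List.mem_append_left _ ((List.takeWhile_sublist _).subset h)
  · exact h

theorem dropWhile_head_not (xs : List Char) (c : Char) (rest : List Char)
    (h : xs.dropWhile pvP = c :: rest) : pvP c = false := by
  induction xs with
  | nil => simp at h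
  | cons d ds ih =>
    by_cases hd : pvP d
    · exact ih (by simpa [hd] using h)
    · simp [hd] at h
      simpa [← h.1] using hd

-- trailing-run length of cs agrees with the trailing-run length of cs with its leading run removed
-- trailing-run length of cs agrees with the trailing-run length of cs with its leading run removed
theorem tail_run_eq (cs : List Char) :
    ((cs.dropWhile pvP).reverse.takeWhile pvP).length =
      min (cs.reverse.takeWhile pvP).length (cs.dropWhile pvP).length := by
  rcases hu : cs.dropWhile pvP with _ | ⟨c, rest⟩
  · -- every char of cs is punctuation, so the takeWhile over cs.reverse is all of it
    have hall : ∀ a ∈ cs, pvP a := by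
      intro a ha
      by_contra hna
      have hnil : cs.dropWhile pvP ≠ [] := by
        intro hnil
        have h := List.takeWhile_append_dropWhile (p := pvP) (l := cs)
        rw [hnil, List.append_nil] at h
        exact hna (List.mem_takeWhile_imp (by rw [h]; exact ha))
      exact hnil hu
    have hrev : cs.reverse.takeWhile pvP = cs.reverse :=
      List.takeWhile_eq_self_iff.mpr (fun a ha => hall a (List.mem_reverse.mp ha))
    simp [hrev]
  · -- the stripped list starts with a non-punctuation char, so its reversed trailing run
    -- is exactly the trailing run of cs
    have hsplit : cs.reverse = (c :: rest).reverse ++ (List.takeWhile pvP cs).reverse := by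
      rw [← List.reverse_append, ← hu, List.takeWhile_append_dropWhile]
    have hc : pvP c = false := dropWhile_head_not cs c rest hu
    have hne : ((c :: rest).reverse.takeWhile pvP).length ≠ (c :: rest).reverse.length := by
      intro hlen
      have heq : (c :: rest).reverse.takeWhile pvP = (c :: rest).reverse :=
        (List.takeWhile_sublist _).eq_of_length hlen
      have hcp : pvP c = true :=
        List.mem_takeWhile_imp (p := pvP) (l := (c :: rest).reverse) (by rw [heq]; simp)
      simp [hc] at hcp
    rw [hsplit, List.takeWhile_append, if_neg hne]
    have hle : ((c :: rest).reverse.takeWhile pvP).length ≤ (c :: rest).length := by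
      simpa using (List.takeWhile_sublist (l := (c :: rest).reverse) (p := pvP)).length_le
    omega

theorem main_lists (cs : List Char) :
    (pvRun cs.reverse).map pvRev ++ pvRstrip (pvLstrip cs (pvRun cs)) (pvRun cs.reverse)
      ++ (pvRun cs).map pvRev
    = (cs.drop (cs.length - pvFirstNon cs.reverse)).reverse.map pvSwap
      ++ ((cs.take (cs.length - pvFirstNon cs.reverse)).drop (pvFirstNon cs))
      ++ (cs.take (pvFirstNon cs)).map pvSwap := by
  have hjle : (cs.reverse.takeWhile pvP).length ≤ cs.length := by
    simpa using (List.takeWhile_sublist (l := cs.reverse) (p := pvP)).length_le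
  have hulen : (cs.takeWhile pvP).length + (cs.dropWhile pvP).length = cs.length := by
    have h := congrArg List.length (List.takeWhile_append_dropWhile (p := pvP) (l := cs))
    rwa [List.length_append] at h
  have htail := tail_run_eq cs
  have h1 : (cs.drop (cs.length - pvFirstNon cs.reverse)).reverse = cs.reverse.takeWhile pvP := by
    rw [pvFirstNon_eq, List.reverse_drop,
      show cs.length - (cs.length - (cs.reverse.takeWhile pvP).length)
        = (cs.reverse.takeWhile pvP).length by omega]
    exact take_takeWhile_length cs.reverse
  have h3 : cs.take (pvFirstNon cs) = cs.takeWhile pvP := by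
    rw [pvFirstNon_eq]; exact take_takeWhile_length cs
  have hlstrip : pvLstrip cs (pvRun cs) = cs.dropWhile pvP := by
    rw [pvLstrip, pvRun_eq_takeWhile]
    exact dropWhile_mem_eq cs _ (fun a ha => ha) (fun a ha => List.mem_takeWhile_imp ha)
  have hrsub : ∀ a ∈ (cs.dropWhile pvP).reverse.takeWhile pvP, a ∈ cs.reverse.takeWhile pvP := by
    intro a ha
    have hsplit : cs.reverse = (cs.dropWhile pvP).reverse ++ (cs.takeWhile pvP).reverse := by
      rw [← List.reverse_append, List.takeWhile_append_dropWhile]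
    rw [hsplit]
    exact mem_takeWhile_append a _ _ ha
  have hrstrip : pvRstrip (cs.dropWhile pvP) (pvRun cs.reverse)
      = (cs.dropWhile pvP).take
          ((cs.dropWhile pvP).length - (cs.reverse.takeWhile pvP).length) := by
    rw [pvRstrip, pvRun_eq_takeWhile,
      dropWhile_mem_eq _ _ hrsub (fun a ha => List.mem_takeWhile_imp ha),
      ← drop_takeWhile_length (cs.dropWhile pvP).reverse, List.reverse_drop,
      List.reverse_reverse, List.length_reverse]
    congr 1
    omega
  have hmidB : (cs.take (cs.length - pvFirstNon cs.reverse)).drop (pvFirstNon cs)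
      = (cs.dropWhile pvP).take
          ((cs.dropWhile pvP).length - (cs.reverse.takeWhile pvP).length) := by
    simp only [pvFirstNon_eq]
    rw [List.drop_take, drop_takeWhile_length]
    congr 1
    omega
  rw [h1, h3, hmidB, hlstrip, hrstrip, pvRun_eq_takeWhile cs, pvRun_eq_takeWhile cs.reverse,
    pvSwap_eq_pvRev]

theorem move_punctuations_eq (s : String) :
    move_punctuations s = move_punctuations_alt s := by
  unfold move_punctuations move_punctuations_alt
  by_cases hcs : s.toList = []
  · have hs : s = "" := by
      have h := String.ofList_toList (s := s)
      rw [hcs] at h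
      exact h.symm
    simp [hs]
  · rw [if_neg hcs]
    exact congrArg String.ofList (main_lists s.toList)

-- ===== VERDICT (by name: the statement is the Claim_ definition above) =====
theorem move_punctuations_spec : Claim_equal_move_punctuations := by
  intro s _
  exact move_punctuations_eq s
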